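-- pv_equiv track=rewrite | github.com/ShaneCoufreur/aoc2025 | solutions/2025/day_09/solution.py | _row_intervals
-- ===== SOURCE A (Python) =====
-- def _row_intervals(
--
--     vertical_edges: list[tuple[int, int, int]],
--     horizontal_edges: list[tuple[int, int, int]],
--     row: int,
-- ) -> list[tuple[int, int]]:
--     """
--     Compute inclusive x-intervals that are inside the polygon on a specific row
--     using the even-odd rule with vertical edges.
--     """
--     counts: dict[int, int] = {}
--     for x, y_min, y_max in vertical_edges:
--         if y_min <= row < y_max:
--             counts[x] = counts.get(x, 0) + 1
--     crossings = sorted(x for x, cnt in counts.items() if cnt % 2 == 1)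
--     if len(crossings) % 2 != 0:
--         return []
--
--     intervals: list[tuple[int, int]] = []
--     for i in range(0, len(crossings), 2):
--         left = crossings[i]
--         right = crossings[i + 1]
--         intervals.append((left, right))
--
--     for x_min, x_max, y in horizontal_edges:
--         if y == row:
--             intervals.append((x_min, x_max))
--
--     if not intervals:
--         return []
--
--     intervals.sort()
--     merged: list[tuple[int, int]] = []
--     cur_start, cur_end = intervals[0]
--     for start, end in intervals[1:]:
--         if start <= cur_end:
--             cur_end = max(cur_end, end)
--         else:
--             merged.append((cur_start, cur_end))
--             cur_start, cur_end = start, end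
--     merged.append((cur_start, cur_end))
--     return merged
-- ===== SOURCE B (Python) =====
-- def _row_intervals(
--     vertical_edges: list[tuple[int, int, int]],
--     horizontal_edges: list[tuple[int, int, int]],
--     row: int,
-- ) -> list[tuple[int, int]]:
--     """Same result via a parity set (symmetric difference), recursive pairing
--     and a structurally recursive interval merge."""
--     odd: set[int] = set()
--     for x, y_min, y_max in vertical_edges:
--         if y_min <= row < y_max:
--             odd ^= {x}
--     crossings = sorted(odd)
--     if len(crossings) % 2:
--         return []
--     intervals = sorted(
--         _pairs(crossings) + [(x0, x1) for x0, x1, y in horizontal_edges if y == row]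
--     )
--     return _merge(intervals)
--
--
-- def _pairs(xs: list[int]) -> list[tuple[int, int]]:
--     if not xs:
--         return []
--     return [(xs[0], xs[1])] + _pairs(xs[2:])
--
--
-- def _merge(iv: list[tuple[int, int]]) -> list[tuple[int, int]]:
--     if not iv:
--         return []
--     (s, e), rest = iv[0], iv[1:]
--     if rest and rest[0][0] <= e:
--         return _merge([(s, max(e, rest[0][1]))] + rest[1:])
--     return [(s, e)] + _merge(rest)
-- ===== Notes on version B (the rewrite author's own statement) =====
-- stated objective: alternative
-- what changed: B keeps crossing parity as a symmetric-difference set instead of A's occurrence-counting dict, builds crossing pairs by structural recursion instead of an index loop over range(0,n,2), gathers horizontal edges with a comprehension instead of an append loop, and merges the sorted intervals with a structurally recursive function instead of A's merged/cur_start/cur_end accumulator loop.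
import Mathlib
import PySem

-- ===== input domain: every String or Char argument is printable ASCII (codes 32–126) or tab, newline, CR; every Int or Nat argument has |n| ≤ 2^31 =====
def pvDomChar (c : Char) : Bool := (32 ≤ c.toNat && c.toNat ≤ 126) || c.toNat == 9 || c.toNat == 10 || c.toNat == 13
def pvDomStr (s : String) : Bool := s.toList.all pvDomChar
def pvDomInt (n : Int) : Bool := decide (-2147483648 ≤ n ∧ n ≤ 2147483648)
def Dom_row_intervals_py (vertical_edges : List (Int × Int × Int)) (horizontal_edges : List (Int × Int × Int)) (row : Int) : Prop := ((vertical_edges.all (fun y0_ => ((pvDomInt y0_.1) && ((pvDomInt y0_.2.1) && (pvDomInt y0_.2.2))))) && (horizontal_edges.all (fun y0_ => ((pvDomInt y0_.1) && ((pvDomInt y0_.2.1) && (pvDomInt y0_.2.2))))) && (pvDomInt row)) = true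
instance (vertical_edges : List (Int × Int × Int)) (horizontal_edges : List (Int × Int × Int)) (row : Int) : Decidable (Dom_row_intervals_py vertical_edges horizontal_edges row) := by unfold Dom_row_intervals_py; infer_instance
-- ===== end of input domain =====

-- B recomputes the same merged inside-row intervals with a parity set, recursive pairing and a
-- structurally recursive merge instead of A's counter dict, index loop and accumulator loop
-- (objective: alternative decomposition, same cost).

-- ===== PORT A =====
def row_intervals_py (vertical_edges : List (Int × Int × Int)) (horizontal_edges : List (Int × Int × Int)) (row : Int) : List (Int × Int) :=
  -- counts[x] = counts.get(x, 0) + 1 for vertical edges crossing the row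
  let counts : PySem.Dict Int Int :=
    vertical_edges.foldl
      (fun d e => if e.2.1 ≤ row ∧ row < e.2.2 then d.insert e.1 (d.getD e.1 0 + 1) else d)
      PySem.Dict.empty
  -- crossings = sorted(x for x, cnt in counts.items() if cnt % 2 == 1)
  let crossings : List Int :=
    PySem.List.sorted ((counts.items.filter (fun p => PySem.Int.mod p.2 2 == 1)).map Prod.fst) (fun x => x)
  if PySem.Int.mod (PySem.List.len crossings) 2 ≠ 0 then []
  else
    -- for i in range(0, len(crossings), 2): intervals.append((crossings[i], crossings[i+1]))
    -- (crossings[i] / crossings[i+1] are always in range here: even length; default 0 is never used)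
    let pairs : List (Int × Int) :=
      (PySem.List.pyRange 0 (PySem.List.len crossings) 2).foldl
        (fun acc i => acc ++ [(PySem.List.pyGetD crossings i 0, PySem.List.pyGetD crossings (i+1) 0)]) []
    -- for x_min, x_max, y in horizontal_edges: if y == row: intervals.append((x_min, x_max))
    let intervals : List (Int × Int) :=
      horizontal_edges.foldl (fun acc e => if e.2.2 = row then acc ++ [(e.1, e.2.1)] else acc) pairs
    if intervals = [] then []
    else
      match PySem.List.sorted2 intervals (fun p => p.1) (fun p => p.2) with
      | [] => []  -- unreachable: sorted of a non-empty list is non-empty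
      | (s0, e0) :: rest =>
        -- merged/cur_start/cur_end accumulator loop over intervals[1:]
        let st : List (Int × Int) × Int × Int :=
          rest.foldl
            (fun (acc : List (Int × Int) × Int × Int) p =>
              if p.1 ≤ acc.2.2 then (acc.1, acc.2.1, max acc.2.2 p.2)
              else (acc.1 ++ [(acc.2.1, acc.2.2)], p.1, p.2))
            ([], s0, e0)
        st.1 ++ [(st.2.1, st.2.2)]

-- ===== PORT B =====
-- _pairs(xs): recursive pairing ([x] would raise IndexError in Source B; that branch is unreachable,
-- _pairs is only applied to even-length lists)
def pvPairs : List Int → List (Int × Int)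
  | [] => []
  | [x] => [(x, 0)]
  | x :: y :: t => (x, y) :: pvPairs t

-- _merge(iv): structurally recursive interval merge
def pvMerge : List (Int × Int) → List (Int × Int)
  | [] => []
  | [p] => [p]
  | p :: q :: rest =>
    if q.1 ≤ p.2 then pvMerge ((p.1, max p.2 q.2) :: rest)
    else p :: pvMerge (q :: rest)
  termination_by l => l.length

def row_intervals_py_alt (vertical_edges : List (Int × Int × Int)) (horizontal_edges : List (Int × Int × Int)) (row : Int) : List (Int × Int) :=
  -- odd ^= {x} for vertical edges crossing the row
  let odd : PySem.Set Int :=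
    vertical_edges.foldl
      (fun s e => if e.2.1 ≤ row ∧ row < e.2.2 then PySem.Set.symmDiff s [e.1] else s)
      PySem.Set.empty
  let crossings : List Int := PySem.List.sorted odd (fun x => x)
  if PySem.Int.mod (PySem.List.len crossings) 2 ≠ 0 then []
  else
    pvMerge
      (PySem.List.sorted2
        (pvPairs crossings ++
          (horizontal_edges.filter (fun e => decide (e.2.2 = row))).map (fun e => (e.1, e.2.1)))
        (fun p => p.1) (fun p => p.2))

-- ===== PRECONDITION & SPEC =====
def Spec_row_intervals_py (vertical_edges : List (Int × Int × Int)) (horizontal_edges : List (Int × Int × Int)) (row : Int) (out : List (Int × Int)) : Prop := out = row_intervals_py_alt vertical_edges horizontal_edges row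
instance (vertical_edges : List (Int × Int × Int)) (horizontal_edges : List (Int × Int × Int)) (row : Int) (out : List (Int × Int)) : Decidable (Spec_row_intervals_py vertical_edges horizontal_edges row out) := by unfold Spec_row_intervals_py; infer_instance

-- ===== CLAIM (what is proved, stated in full; the proofs are below) =====
def Claim_equal_row_intervals_py : Prop := ∀ (vertical_edges : List (Int × Int × Int)) (horizontal_edges : List (Int × Int × Int)) (row : Int), Dom_row_intervals_py vertical_edges horizontal_edges row → Spec_row_intervals_py vertical_edges horizontal_edges row (row_intervals_py vertical_edges horizontal_edges row)

-- ===== LEMMAS AND PROOFS =====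

-- x has odd count in A's dict  ↔  x is in B's parity set (invariant of the two folds)
theorem pv_parity_inv (l : List (Int × Int × Int)) (row : Int) (d : PySem.Dict Int Int)
    (s : PySem.Set Int)
    (h : ∀ x, x ∈ s ↔ PySem.Int.mod (d.getD x 0) 2 = 1) :
    ∀ x, x ∈ l.foldl (fun s e => if e.2.1 ≤ row ∧ row < e.2.2 then PySem.Set.symmDiff s [e.1] else s) s
      ↔ PySem.Int.mod
          ((l.foldl (fun d e => if e.2.1 ≤ row ∧ row < e.2.2 then d.insert e.1 (d.getD e.1 0 + 1) else d) d).getD x 0) 2 = 1 := by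
  induction l generalizing d s with
  | nil => simpa using h
  | cons e t ih =>
    by_cases hc : e.2.1 ≤ row ∧ row < e.2.2
    · simp only [List.foldl_cons, if_pos hc]
      apply ih
      intro x
      rw [PySem.Set.mem_symmDiff, PySem.Dict.getD_insert]
      have hx2 := h e.1
      rw [PySem.Int.mod_eq_emod_of_pos (by norm_num)] at hx2 ⊢
      by_cases hx : x = e.1
      · subst hx
        rw [if_pos rfl]
        constructor
        · rintro (⟨hs, hne⟩ | ⟨hin, hns⟩)
          · exact absurd (List.mem_singleton.mpr rfl) hne
          · have h2 : ¬ (d.getD e.1 0 % 2 = 1) := fun hh => hns (hx2.mpr hh)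
            omega
        · intro hm
          exact Or.inr ⟨List.mem_singleton.mpr rfl, fun hs => by have := hx2.mp hs; omega⟩
      · have hx1 := h x
        rw [PySem.Int.mod_eq_emod_of_pos (by norm_num)] at hx1
        rw [if_neg hx, ← hx1]
        constructor
        · rintro (⟨hs, _⟩ | ⟨hin, _⟩)
          · exact hs
          · exact absurd (List.mem_singleton.mp hin) hx
        · intro hs; exact Or.inl ⟨hs, fun hin => hx (List.mem_singleton.mp hin)⟩
    · simp only [List.foldl_cons, if_neg hc]
      exact ih d s h

theorem pv_keys_nodup (l : List (Int × Int × Int)) (row : Int) (d : PySem.Dict Int Int)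
    (h : d.keys.Nodup) :
    (l.foldl (fun d e => if e.2.1 ≤ row ∧ row < e.2.2 then d.insert e.1 (d.getD e.1 0 + 1) else d) d).keys.Nodup := by
  induction l generalizing d with
  | nil => exact h
  | cons e t ih =>
    by_cases hc : e.2.1 ≤ row ∧ row < e.2.2
    · simp only [List.foldl_cons, if_pos hc]
      exact ih _ (PySem.Dict.nodup_keys_insert d e.1 _ h)
    · simp only [List.foldl_cons, if_neg hc]
      exact ih d h

theorem pv_set_nodup (l : List (Int × Int × Int)) (row : Int) (s : PySem.Set Int) (h : s.Nodup) :
    (l.foldl (fun s e => if e.2.1 ≤ row ∧ row < e.2.2 then PySem.Set.symmDiff s [e.1] else s) s).Nodup := by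
  induction l generalizing s with
  | nil => exact h
  | cons e t ih =>
    by_cases hc : e.2.1 ≤ row ∧ row < e.2.2
    · simp only [List.foldl_cons, if_pos hc]
      exact ih _ (PySem.Set.nodup_symmDiff s [e.1] h (List.nodup_singleton _))
    · simp only [List.foldl_cons, if_neg hc]
      exact ih s h

-- A's sorted odd-count keys = B's sorted parity set
theorem pv_cross_eq (V : List (Int × Int × Int)) (row : Int) :
    PySem.List.sorted
      (((V.foldl (fun d e => if e.2.1 ≤ row ∧ row < e.2.2 then d.insert e.1 (d.getD e.1 0 + 1) else d)
          (PySem.Dict.empty : PySem.Dict Int Int)).items.filter (fun p => PySem.Int.mod p.2 2 == 1)).map Prod.fst) (fun x => x)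
    = PySem.List.sorted
        (V.foldl (fun s e => if e.2.1 ≤ row ∧ row < e.2.2 then PySem.Set.symmDiff s [e.1] else s)
          PySem.Set.empty) (fun x => x) := by
  apply PySem.List.sorted_eq_sorted_of_perm _ _ _ (fun a b hab => hab)
  have hkeys : (V.foldl (fun d e => if e.2.1 ≤ row ∧ row < e.2.2 then d.insert e.1 (d.getD e.1 0 + 1) else d)
      (PySem.Dict.empty : PySem.Dict Int Int)).keys.Nodup :=
    pv_keys_nodup V row (PySem.Dict.empty : PySem.Dict Int Int) PySem.Dict.nodup_keys_empty
  have hkeys' : ((V.foldl (fun d e => if e.2.1 ≤ row ∧ row < e.2.2 then d.insert e.1 (d.getD e.1 0 + 1) else d)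
      (PySem.Dict.empty : PySem.Dict Int Int)).items.map Prod.fst).Nodup := hkeys
  have hA : (((V.foldl (fun d e => if e.2.1 ≤ row ∧ row < e.2.2 then d.insert e.1 (d.getD e.1 0 + 1) else d)
      (PySem.Dict.empty : PySem.Dict Int Int)).items.filter (fun p => PySem.Int.mod p.2 2 == 1)).map Prod.fst).Nodup := by
    have hsub := (List.filter_sublist
      (l := (V.foldl (fun d e => if e.2.1 ≤ row ∧ row < e.2.2 then d.insert e.1 (d.getD e.1 0 + 1) else d)
        (PySem.Dict.empty : PySem.Dict Int Int)).items) (p := fun p => PySem.Int.mod p.2 2 == 1)).map Prod.fst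
    exact List.Sublist.nodup hsub hkeys'
  have hB := pv_set_nodup V row PySem.Set.empty List.nodup_nil
  rw [List.perm_ext_iff_of_nodup hA hB]
  intro x
  have hbase : ∀ y : Int, y ∈ (PySem.Set.empty : PySem.Set Int)
      ↔ PySem.Int.mod ((PySem.Dict.empty : PySem.Dict Int Int).getD y 0) 2 = 1 := by
    intro y
    constructor
    · intro hy; simp [PySem.Set.empty] at hy
    · intro hmod; rw [PySem.Dict.getD_empty] at hmod; exact absurd hmod (by decide)
  have hpar := pv_parity_inv V row (PySem.Dict.empty : PySem.Dict Int Int) (PySem.Set.empty : PySem.Set Int) hbase x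
  rw [hpar]
  constructor
  · intro hx
    obtain ⟨p, hp, hfst⟩ := List.mem_map.mp hx
    obtain ⟨hpi, hodd⟩ := List.mem_filter.mp hp
    obtain ⟨k, v⟩ := p
    cases hfst
    rw [PySem.Dict.getD_of_mem_items _ hpi hkeys 0]
    exact beq_iff_eq.mp hodd
  · intro hmod
    cases hg : (V.foldl (fun d e => if e.2.1 ≤ row ∧ row < e.2.2 then d.insert e.1 (d.getD e.1 0 + 1) else d)
        (PySem.Dict.empty : PySem.Dict Int Int)).get? x with
    | none =>
      rw [PySem.Dict.getD_of_get?_eq_none _ _ hg] at hmod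
      exact absurd hmod (by decide)
    | some v =>
      have hv := PySem.Dict.getD_of_get?_eq_some _ (d0 := 0) hg
      have hitems := PySem.Dict.mem_items_of_get?_eq_some _ hg
      exact List.mem_map.mpr ⟨(x, v),
        List.mem_filter.mpr ⟨hitems, by
          dsimp only
          rw [beq_iff_eq, ← hv]
          exact hmod⟩, rfl⟩

theorem pv_pairsA_map (m : Nat) : ∀ (xs : List Int), xs.length = 2*m →
    (List.range m).map (fun k => ((xs.getD (2*k) 0 : Int), (xs.getD (2*k+1) 0 : Int))) = pvPairs xs := by
  induction m with
  | zero =>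
    intro xs h
    have hx : xs = [] := List.length_eq_zero_iff.mp (by omega)
    subst hx
    simp [pvPairs]
  | succ m ih =>
    intro xs h
    match xs, h with
    | x :: y :: t, h =>
      rw [List.range_succ_eq_map, List.map_cons, List.map_map]
      have hrest : ∀ k ∈ List.range m,
          ((fun k => (((x :: y :: t).getD (2*k) 0 : Int), ((x :: y :: t).getD (2*k+1) 0 : Int))) ∘ Nat.succ) k
          = (fun k => ((t.getD (2*k) 0 : Int), (t.getD (2*k+1) 0 : Int))) k := by
        intro k _
        simp only [Function.comp_apply]
        have e2 : 2 * Nat.succ k + 1 = 2*k + 1 + 1 + 1 := by omega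
        have e1 : 2 * Nat.succ k = 2*k + 1 + 1 := by omega
        rw [e2, e1]
        simp only [List.getD_cons_succ]
      rw [List.map_congr_left hrest, ih t (by simp at h; omega)]
      rfl

-- A's indexed pairing loop = B's recursive pairing on an even-length list
theorem pv_pairs_eq (xs : List Int) (h : xs.length % 2 = 0) :
    (PySem.List.pyRange 0 (PySem.List.len xs) 2).foldl
      (fun acc i => acc ++ [(PySem.List.pyGetD xs i 0, PySem.List.pyGetD xs (i+1) 0)]) []
    = pvPairs xs := by
  rw [PySem.List.foldl_append_singleton_eq_map, List.nil_append, PySem.List.len_eq,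
    PySem.List.pyRange_of_pos _ _ (by norm_num : (0:Int) < 2)]
  obtain ⟨m, hm⟩ : ∃ m, xs.length = 2*m := ⟨xs.length/2, by omega⟩
  have hcount : (if (0:Int) < (xs.length:Int) then (((xs.length:Int) - 0 + 2 - 1)/2).toNat else 0) = m := by
    rw [hm]; push_cast; split <;> omega
  rw [hcount, List.map_map]
  have hfun : ∀ k ∈ List.range m,
      ((fun i => (PySem.List.pyGetD xs i 0, PySem.List.pyGetD xs (i+1) 0)) ∘ (fun k : Nat => (0:Int) + 2 * (k:Int))) k
      = (fun k : Nat => ((xs.getD (2*k) 0 : Int), (xs.getD (2*k+1) 0 : Int))) k := by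
    intro k _
    simp only [Function.comp_apply]
    have e1 : (0 : Int) + 2*(k:Int) = ((2*k : Nat) : Int) := by push_cast; ring
    rw [e1, PySem.List.pyGetD_natCast]
    have e2 : ((2*k : Nat) : Int) + 1 = ((2*k+1 : Nat) : Int) := by push_cast; ring
    rw [e2, PySem.List.pyGetD_natCast]
  rw [List.map_congr_left hfun]
  exact pv_pairsA_map m xs hm

-- A's merge loop with accumulator (merged, cur_start, cur_end) = acc ++ B's recursive merge
theorem pv_merge_loop (l : List (Int × Int)) : ∀ (acc : List (Int × Int)) (cs ce : Int),
    (l.foldl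
        (fun (a : List (Int × Int) × Int × Int) p =>
          if p.1 ≤ a.2.2 then (a.1, a.2.1, max a.2.2 p.2)
          else (a.1 ++ [(a.2.1, a.2.2)], p.1, p.2))
        (acc, cs, ce)).1
      ++ [((l.foldl
        (fun (a : List (Int × Int) × Int × Int) p =>
          if p.1 ≤ a.2.2 then (a.1, a.2.1, max a.2.2 p.2)
          else (a.1 ++ [(a.2.1, a.2.2)], p.1, p.2))
        (acc, cs, ce)).2.1,
        (l.foldl
        (fun (a : List (Int × Int) × Int × Int) p =>
          if p.1 ≤ a.2.2 then (a.1, a.2.1, max a.2.2 p.2)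
          else (a.1 ++ [(a.2.1, a.2.2)], p.1, p.2))
        (acc, cs, ce)).2.2)]
    = acc ++ pvMerge ((cs, ce) :: l) := by
  induction l with
  | nil => intro acc cs ce; simp [pvMerge]
  | cons p t ih =>
    intro acc cs ce
    obtain ⟨s, e⟩ := p
    simp only [List.foldl_cons]
    by_cases hse : s ≤ ce
    · dsimp only
      rw [if_pos hse, ih acc cs (max ce e)]
      congr 1
      conv_rhs => rw [pvMerge]
      rw [if_pos hse]
    · dsimp only
      rw [if_neg hse, ih (acc ++ [(cs, ce)]) s e]
      conv_rhs => rw [pvMerge]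
      rw [if_neg hse]
      simp [List.append_assoc]

-- ===== VERDICT (by name: the statement is the Claim_ definition above) =====
theorem row_intervals_py_spec : Claim_equal_row_intervals_py := by
  intro V H row _
  unfold Spec_row_intervals_py row_intervals_py row_intervals_py_alt
  dsimp only
  rw [pv_cross_eq]
  by_cases hg : PySem.Int.mod (PySem.List.len (PySem.List.sorted
      (V.foldl (fun s e => if e.2.1 ≤ row ∧ row < e.2.2 then PySem.Set.symmDiff s [e.1] else s)
        PySem.Set.empty) (fun x => x))) 2 ≠ 0
  · rw [if_pos hg, if_pos hg]
  · rw [if_neg hg, if_neg hg]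
    set cr := PySem.List.sorted
      (V.foldl (fun s e => if e.2.1 ≤ row ∧ row < e.2.2 then PySem.Set.symmDiff s [e.1] else s)
        PySem.Set.empty) (fun x => x) with hcr
    have heven : cr.length % 2 = 0 := by
      rw [not_not] at hg
      rw [PySem.List.len_eq, PySem.Int.mod_eq_emod_of_pos (by norm_num)] at hg
      omega
    rw [pv_pairs_eq cr heven, PySem.List.foldl_append_ite (fun e => e.2.2 = row) (fun e => (e.1, e.2.1)) H (pvPairs cr)]
    set ivs := pvPairs cr ++ (H.filter fun e => decide (e.2.2 = row)).map (fun e => (e.1, e.2.1)) with hivs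
    by_cases hemp : ivs = []
    · rw [if_pos hemp, hemp]
      show ([] : List (Int × Int)) = pvMerge []
      simp [pvMerge]
    · rw [if_neg hemp]
      have hsne : PySem.List.sorted2 ivs (fun p => p.1) (fun p => p.2) ≠ [] := by
        intro h0
        have hp := PySem.List.sorted2_perm ivs (fun p => p.1) (fun p => p.2) false
        rw [h0] at hp
        exact hemp (List.Perm.eq_nil hp.symm)
      obtain ⟨p, rest, hst⟩ := List.exists_cons_of_ne_nil hsne
      obtain ⟨s0, e0⟩ := p
      rw [hst]
      simpa using pv_merge_loop rest [] s0 e0
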